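-- pv_equiv track=rewrite | github.com/AP-MI-2021/lab-3-MarianMutu | main.py | get_longest_div_k
-- ===== SOURCE A (Python) =====
-- def get_longest_div_k(lst, k):
--     """
--     Determina subsecventa cu toate numerele divizibile cu k
--     :param lst: int
--     :param k: int
--     :return: lista ceruta -> int
--     """
--     rez1 = []  # rezultatul cerut
--     temp1 = []  # lista temporara
--     for x in lst:
--         if x % k == 0:
--             temp1.append(x)
--         else:
--             if len(rez1) < len(temp1):
--                 rez1 = temp1[:]
--             temp1.clear()
--
--     return rez1
-- ===== SOURCE B (Python) =====
-- def get_longest_div_k(lst, k):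
--     """Longest run of k-divisible elements ended by a non-divisible element (earliest wins)."""
--     best = []
--     run_start = 0
--     for i, x in enumerate(lst):
--         if x % k != 0:
--             if i - run_start > len(best):
--                 best = lst[run_start:i]
--             run_start = i + 1
--     return best
-- ===== Notes on version B (the rewrite author's own statement) =====
-- stated objective: alternative
-- what changed: B tracks only the start index of the current divisible run and slices the candidate out of the input at each non-divisible separator, instead of A's growing temporary list that is copied into the result and cleared; the maintained state is (best, start index) rather than A's two accumulated lists.
import Mathlib
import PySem

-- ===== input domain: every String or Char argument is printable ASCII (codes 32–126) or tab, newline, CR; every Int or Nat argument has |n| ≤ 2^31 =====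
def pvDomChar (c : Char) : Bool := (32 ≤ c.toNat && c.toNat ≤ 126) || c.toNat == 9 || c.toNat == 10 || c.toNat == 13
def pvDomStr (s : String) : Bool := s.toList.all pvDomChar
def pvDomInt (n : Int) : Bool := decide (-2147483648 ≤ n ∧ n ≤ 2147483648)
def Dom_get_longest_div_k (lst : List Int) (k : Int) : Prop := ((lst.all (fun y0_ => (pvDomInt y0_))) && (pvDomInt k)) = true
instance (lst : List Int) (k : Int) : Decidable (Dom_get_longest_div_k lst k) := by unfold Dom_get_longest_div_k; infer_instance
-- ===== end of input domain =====

-- B keeps only the start INDEX of the current run and slices the candidate out of the input at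
-- each non-divisible separator, instead of A's accumulated temporary list that is copied and
-- cleared (alternative decomposition, same cost).

-- ===== PORT A =====
-- the body of A's for-loop over lst; state = (rez1, temp1)
def pvStepA (k : Int) (s : List Int × List Int) (x : Int) : List Int × List Int :=
  if PySem.Int.mod x k = 0 then (s.1, s.2 ++ [x])
  else if s.1.length < s.2.length then (s.2, ([] : List Int))
  else (s.1, ([] : List Int))

def get_longest_div_k (lst : List Int) (k : Int) : List Int :=
  (lst.foldl (pvStepA k) (([] : List Int), ([] : List Int))).1

-- ===== PORT B =====
-- the body of B's 'for i, x in enumerate(lst)' loop; state = (best, run_start)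
def pvStepB (lst : List Int) (k : Int) (s : List Int × Int) (ix : Int × Int) : List Int × Int :=
  if PySem.Int.mod ix.2 k ≠ 0 then
    ((if (s.1.length : Int) < ix.1 - s.2 then PySem.List.slice lst (some s.2) (some ix.1)
       else s.1),
     ix.1 + 1)
  else s

def get_longest_div_k_alt (lst : List Int) (k : Int) : List Int :=
  ((PySem.List.enumerate lst).foldl (pvStepB lst k) (([] : List Int), (0 : Int))).1

-- ===== PRECONDITION & SPEC =====
-- Pre_ excludes exactly the inputs where the Python A raises ZeroDivisionError:
-- k == 0 with a non-empty list (x % 0 in the loop body); the empty list stays inside Pre_.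
def Pre_get_longest_div_k (lst : List Int) (k : Int) : Prop := k ≠ 0 ∨ lst = []
instance (lst : List Int) (k : Int) : Decidable (Pre_get_longest_div_k lst k) := by
  unfold Pre_get_longest_div_k; infer_instance

def pvWitness_get_longest_div_k : List Int × Int := ([2, 3, 4, 4, 5], 2)

def Spec_get_longest_div_k (lst : List Int) (k : Int) (out : List Int) : Prop := out = get_longest_div_k_alt lst k
instance (lst : List Int) (k : Int) (out : List Int) : Decidable (Spec_get_longest_div_k lst k out) := by unfold Spec_get_longest_div_k; infer_instance

-- ===== CLAIM (what is proved, stated in full; the proofs are below) =====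
def Claim_equal_get_longest_div_k : Prop := ∀ (lst : List Int) (k : Int), Dom_get_longest_div_k lst k → Pre_get_longest_div_k lst k → Spec_get_longest_div_k lst k (get_longest_div_k lst k)

-- ===== LEMMAS AND PROOFS =====

-- the slice lst[rs:i] for natural rs ≤ i ≤ |lst| has length i - rs
theorem pvSlice_len (lst : List Int) (rs i : Nat) (hi : i ≤ lst.length) :
    (PySem.List.slice lst (some (rs : Int)) (some (i : Int))).length = i - rs := by
  rw [PySem.List.slice_natCast]
  simp
  omega

-- extending the slice lst[rs:i] by lst[i] gives lst[rs:i+1]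
theorem pvSlice_snoc (lst : List Int) (rs i : Nat) (hrs : rs ≤ i) (hi : i < lst.length) :
    PySem.List.slice lst (some (rs : Int)) (some (i : Int)) ++ [lst[i]]
      = PySem.List.slice lst (some (rs : Int)) (some ((i + 1 : Nat) : Int)) := by
  rw [PySem.List.slice_natCast, PySem.List.slice_natCast]
  have h1 : i + 1 - rs = (i - rs) + 1 := by omega
  rw [h1, List.take_add_one]
  have h2 : (lst.drop rs)[i - rs]? = some lst[i] := by
    rw [List.getElem?_drop]
    rw [List.getElem?_eq_getElem (by omega)]
    congr 1
    congr 1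
    omega
  rw [h2]
  rfl

-- the empty slice lst[i:i]
theorem pvSlice_self (lst : List Int) (i : Nat) :
    PySem.List.slice lst (some (i : Int)) (some (i : Int)) = [] := by
  rw [PySem.List.slice_natCast]
  simp

-- main bridge: A's fold with temp1 = lst[rs:i] equals B's fold with run_start = rs,
-- over the suffix lst.drop i
theorem pvBridge (lst : List Int) (k : Int) :
    ∀ (ys : List Int) (i rs : Nat) (a : List Int),
      i + ys.length = lst.length → lst.drop i = ys → rs ≤ i →
      (ys.foldl (pvStepA k) (a, PySem.List.slice lst (some (rs : Int)) (some (i : Int)))).1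
        = ((PySem.List.enumerate ys (i : Int)).foldl (pvStepB lst k) (a, (rs : Int))).1 := by
  intro ys
  induction ys with
  | nil =>
    intro i rs a hlen hdrop hrs
    simp [PySem.List.enumerate_nil]
  | cons x ys' ih =>
    intro i rs a hlen hdrop hrs
    have hi : i < lst.length := by
      simp only [List.length_cons] at hlen; omega
    have hcons : lst.drop i = lst[i] :: lst.drop (i + 1) := List.drop_eq_getElem_cons hi
    rw [hdrop] at hcons
    obtain ⟨hx, hys'⟩ : x = lst[i] ∧ ys' = lst.drop (i + 1) := by
      exact ⟨by injection hcons, by injection hcons⟩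
    rw [PySem.List.enumerate_cons]
    simp only [List.foldl_cons]
    by_cases hd : PySem.Int.mod x k = 0
    · -- divisible: A appends x to temp1, B leaves its state unchanged
      rw [show pvStepA k (a, PySem.List.slice lst (some (rs : Int)) (some (i : Int))) x
          = (a, PySem.List.slice lst (some (rs : Int)) (some (i : Int)) ++ [x]) from by
        simp [pvStepA, hd]]
      rw [show pvStepB lst k (a, (rs : Int)) ((i : Int), x) = (a, (rs : Int)) from by
        simp [pvStepB, hd]]
      rw [hx, pvSlice_snoc lst rs i hrs hi]
      have := ih (i + 1) rs a (by simp only [List.length_cons] at hlen; omega)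
        hys'.symm (by omega)
      rw [show ((i : Int) + 1) = ((i + 1 : Nat) : Int) from by push_cast; ring]
      exact this
    · -- separator: A flushes temp1, B flushes the slice; the states stay in lockstep
      have hlen' : (PySem.List.slice lst (some (rs : Int)) (some (i : Int))).length = i - rs :=
        pvSlice_len lst rs i (by omega)
      rw [show pvStepA k (a, PySem.List.slice lst (some (rs : Int)) (some (i : Int))) x
          = ((if a.length < i - rs then PySem.List.slice lst (some (rs : Int)) (some (i : Int))
              else a), []) from by
        simp only [pvStepA, if_neg hd, hlen']
        split <;> rfl]
      rw [show pvStepB lst k (a, (rs : Int)) ((i : Int), x)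
          = ((if a.length < i - rs then PySem.List.slice lst (some (rs : Int)) (some (i : Int))
              else a), (i : Int) + 1) from by
        simp only [pvStepB, if_pos hd]
        congr 1
        have hcond : ((a.length : Int) < (i : Int) - (rs : Int)) ↔ (a.length < i - rs) := by
          omega
        by_cases hc : a.length < i - rs
        · rw [if_pos (hcond.mpr hc), if_pos hc]
        · rw [if_neg (fun hh => hc (hcond.mp hh)), if_neg hc]]
      rw [show ([] : List Int)
          = PySem.List.slice lst (some ((i + 1 : Nat) : Int)) (some ((i + 1 : Nat) : Int)) from
        (pvSlice_self lst (i + 1)).symm]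
      have := ih (i + 1) (i + 1)
        (if a.length < i - rs then PySem.List.slice lst (some (rs : Int)) (some (i : Int)) else a)
        (by simp only [List.length_cons] at hlen; omega) hys'.symm (by omega)
      rw [show ((i : Int) + 1) = ((i + 1 : Nat) : Int) from by push_cast; ring]
      exact this

-- ===== VERDICT (by name: the statement is the Claim_ definition above) =====
theorem get_longest_div_k_spec : Claim_equal_get_longest_div_k := by
  intro lst k _ _
  unfold Spec_get_longest_div_k get_longest_div_k get_longest_div_k_alt
  have h0 : (([] : List Int), ([] : List Int))
      = (([] : List Int), PySem.List.slice lst (some ((0 : Nat) : Int)) (some ((0 : Nat) : Int))) := by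
    rw [pvSlice_self]
  rw [h0]
  have hE : PySem.List.enumerate lst = PySem.List.enumerate lst ((0 : Nat) : Int) := by
    norm_num
  rw [hE]
  exact pvBridge lst k lst (0 : Nat) (0 : Nat) [] (by simp) (by simp) (by omega)
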